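-- pv_equiv track=rewrite | github.com/JuanCogollo/fundamentos-de-programacion-2022 | modulo8/ejercicio7_a.py | serieJulianachi
-- ===== SOURCE A (Python) =====
-- def serieJulianachi(n):
--     Julianachi = [1]
--     while Julianachi[-1] <= n:
--         contador = 0
--         for i in range(1, Julianachi[-1]+1):
--             if Julianachi[-1] % i == 0:
--                 contador += 1
--         Julianachi.append(Julianachi[-1] + contador)
--     return (Julianachi)
-- ===== SOURCE B (Python) =====
-- def serieJulianachi(n):
--     serie = [1]
--     last = 1
--     while last <= n:
--         c = 0
--         i = 1
--         while i * i <= last: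
--             if last % i == 0:
--                 c += 1 if i * i == last else 2
--             i += 1
--         last += c
--         serie.append(last)
--     return serie
-- ===== Notes on version B (the rewrite author's own statement) =====
-- stated objective: faster
-- what changed: B counts each term's divisors by trial division only up to sqrt(term), pairing each small divisor i with term//i, instead of A's scan over every integer up to the term.
import Mathlib
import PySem

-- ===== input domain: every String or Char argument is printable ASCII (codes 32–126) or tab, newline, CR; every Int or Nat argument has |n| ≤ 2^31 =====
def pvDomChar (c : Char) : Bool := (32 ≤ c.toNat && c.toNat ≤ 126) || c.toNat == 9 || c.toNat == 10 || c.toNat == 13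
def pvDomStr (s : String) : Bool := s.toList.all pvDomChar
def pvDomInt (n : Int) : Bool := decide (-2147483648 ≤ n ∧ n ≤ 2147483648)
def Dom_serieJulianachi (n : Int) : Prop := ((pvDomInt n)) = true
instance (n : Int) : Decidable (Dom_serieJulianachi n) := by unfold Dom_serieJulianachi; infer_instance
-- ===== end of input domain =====

-- B replaces A's per-term divisor scan over 1..term by trial division up to sqrt(term) pairing
-- each small divisor i with term // i (objective: faster, asymptotically fewer trial divisions).

-- B replaces A's per-term divisor scan over 1..term by trial division up to sqrt(term),
-- pairing each small divisor i with term // i (objective: faster; fewer trial divisions per term).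
-- Both loop ports carry a fuel argument solely as a structural-termination guard; the chosen
-- fuel is always at least the number of iterations the Python loops perform.

-- ===== PORT A =====
-- the inner 'for i in range(1, last+1): if last % i == 0: contador += 1' loop of A
def pvCountA (m : Int) : Int :=
  (PySem.List.pyRange 1 (m + 1) 1).foldl
    (fun contador i => if PySem.Int.mod m i == 0 then contador + 1 else contador) 0

-- the while-loop of A; 'last' is Julianachi[-1], 'acc' the list built so far
def pvLoopA (n : Int) (fuel : ℕ) (last : Int) (acc : List Int) : List Int :=
  match fuel with
  | 0 => acc
  | fuel + 1 =>
    if last ≤ n then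
      pvLoopA n fuel (last + pvCountA last) (acc ++ [last + pvCountA last])
    else acc

def serieJulianachi (n : Int) : List Int := pvLoopA n (n.toNat + 1) 1 [1]

-- ===== PORT B =====
-- B's inner loop: 'while i*i <= last: if last % i == 0: c += 1 if i*i == last else 2; i += 1'
def pvCountBGo (m : Int) (fuel : ℕ) (i c : Int) : Int :=
  match fuel with
  | 0 => c
  | fuel + 1 =>
    if i * i ≤ m then
      pvCountBGo m fuel (i + 1)
        (if PySem.Int.mod m i == 0 then (if i * i == m then c + 1 else c + 2) else c)
    else c

def pvCountB (m : Int) : Int := pvCountBGo m (m.toNat + 1) 1 0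

-- B's while-loop over the series (same series recurrence, divisor count via pvCountB)
def pvLoopB (n : Int) (fuel : ℕ) (last : Int) (acc : List Int) : List Int :=
  match fuel with
  | 0 => acc
  | fuel + 1 =>
    if last ≤ n then
      pvLoopB n fuel (last + pvCountB last) (acc ++ [last + pvCountB last])
    else acc

def serieJulianachi_alt (n : Int) : List Int := pvLoopB n (n.toNat + 1) 1 [1]

-- ===== PRECONDITION & SPEC =====
def Spec_serieJulianachi (n : Int) (out : List Int) : Prop := out = serieJulianachi_alt n
instance (n : Int) (out : List Int) : Decidable (Spec_serieJulianachi n out) := by unfold Spec_serieJulianachi; infer_instance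

-- ===== CLAIM (what is proved, stated in full; the proofs are below) =====
def Claim_equal_serieJulianachi : Prop := ∀ (n : Int), Dom_serieJulianachi n → Spec_serieJulianachi n (serieJulianachi n)

-- ===== LEMMAS AND PROOFS =====

-- A's count equals the number of divisors of M in [1, M]
theorem pvCountA_eq (M : ℕ) (hM : 1 ≤ M) :
    pvCountA (M : Int) = (((Finset.Icc 1 M).filter (· ∣ M)).card : Int) := by
  unfold pvCountA
  rw [PySem.List.foldl_if_add_one, PySem.List.pyRange_one]
  have ht : ((M : Int) + 1 - 1).toNat = M := by omega
  rw [ht, List.countP_map]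
  have hc : (List.range M).countP
        ((fun i => PySem.Int.mod (M : Int) i == 0) ∘ fun k : ℕ => (1 : Int) + (k : Int))
      = (List.range M).countP (fun k : ℕ => decide ((1 + k) ∣ M)) := by
    refine List.countP_congr ?_
    intro k _
    simp only [Function.comp_apply]
    have hcast : (1 : Int) + (k : Int) = ((1 + k : ℕ) : Int) := by push_cast; ring
    by_cases hd : (1 + k) ∣ M
    · have hz : PySem.Int.mod (M : Int) ((1 : Int) + (k : Int)) = 0 := by
        rw [PySem.Int.mod_eq_zero_iff_dvd, hcast]
        exact_mod_cast hd
      simp [hz, hd]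
    · have hz : ¬ PySem.Int.mod (M : Int) ((1 : Int) + (k : Int)) = 0 := by
        rw [PySem.Int.mod_eq_zero_iff_dvd, hcast]
        exact_mod_cast hd
      simp [hz, hd]
  rw [hc]
  have hr : (List.range M).countP (fun k : ℕ => decide ((1 + k) ∣ M))
      = ((Finset.range M).filter (fun k => (1 + k) ∣ M)).card := by
    rw [List.countP_eq_length_filter]
    rfl
  have hb : ((Finset.range M).filter (fun k => (1 + k) ∣ M)).card
      = ((Finset.Icc 1 M).filter (· ∣ M)).card := by
    refine Finset.card_bij (fun k _ => 1 + k) ?_ ?_ ?_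
    · intro k hk
      simp only [Finset.mem_filter, Finset.mem_range] at hk
      simp only [Finset.mem_filter, Finset.mem_Icc]
      exact ⟨⟨by omega, by omega⟩, hk.2⟩
    · intro k1 h1 k2 h2 he
      have he' : 1 + k1 = 1 + k2 := he
      omega
    · intro d hd
      simp only [Finset.mem_filter, Finset.mem_Icc] at hd
      refine ⟨d - 1, ?_, show 1 + (d - 1) = d by omega⟩
      simp only [Finset.mem_filter, Finset.mem_range]
      have hd1 : 1 + (d - 1) = d := by omega
      rw [hd1]
      exact ⟨by omega, hd.2⟩
  rw [hr, hb]
  omega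

-- B's inner loop computes the paired-divisor sum over the not-yet-visited trial divisors
theorem pvCountBGo_eq (M : ℕ) :
    ∀ (fuel : ℕ) (I : ℕ) (c : Int), 1 ≤ I → Nat.sqrt M + 1 ≤ I + fuel →
    pvCountBGo (M : Int) fuel (I : Int) c
      = c + ((∑ d ∈ Finset.Ico I (Nat.sqrt M + 1),
          (if d ∣ M then (if d * d = M then 1 else 2) else 0) : ℕ) : Int) := by
  intro fuel
  induction fuel with
  | zero =>
    intro I c hI hfuel
    rw [pvCountBGo, Finset.Ico_eq_empty (by omega)]
    simp
  | succ fuel ih =>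
    intro I c hI hfuel
    rw [pvCountBGo]
    by_cases hle : (I : Int) * (I : Int) ≤ (M : Int)
    · have hII : I * I ≤ M := by exact_mod_cast hle
      have hlt : I < Nat.sqrt M + 1 := by
        have := Nat.le_sqrt.mpr hII; omega
      rw [if_pos hle]
      have hcast : ((I : Int)) + 1 = ((I + 1 : ℕ) : Int) := by push_cast; ring
      rw [hcast, ih (I + 1) _ (by omega) (by omega)]
      rw [Finset.sum_eq_sum_Ico_succ_bot hlt]
      have e1 : (PySem.Int.mod (M : Int) (I : Int) == 0) = decide (I ∣ M) := by
        by_cases hd : I ∣ M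
        · have hz : PySem.Int.mod (M : Int) (I : Int) = 0 := by
            rw [PySem.Int.mod_eq_zero_iff_dvd]
            exact_mod_cast hd
          simp [hz, hd]
        · simp only [hd, decide_false]
          rw [show ((PySem.Int.mod (M : Int) (I : Int) == 0) = false) ↔
              ¬ PySem.Int.mod (M : Int) (I : Int) = 0 from by simp]
          rw [PySem.Int.mod_eq_zero_iff_dvd]
          exact fun hcon => hd (Int.natCast_dvd_natCast.mp hcon)
      have e2 : ((I : Int) * (I : Int) == (M : Int)) = decide (I * I = M) := by
        by_cases hq : I * I = M
        · have hz : (I : Int) * (I : Int) = (M : Int) := by exact_mod_cast hq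
          simp [hz, hq]
        · have hz : ¬ (I : Int) * (I : Int) = (M : Int) := by
            intro hcon
            exact hq (by exact_mod_cast hcon)
          simp [hz, hq]
      rw [e1, e2]
      by_cases hd : I ∣ M <;> by_cases hq : I * I = M <;>
        simp only [hd, hq, decide_true, decide_false, if_true, if_false] <;>
        push_cast <;> ring
    · have hII : ¬ I * I ≤ M := fun hc => hle (by exact_mod_cast hc)
      have hge : Nat.sqrt M + 1 ≤ I := by
        by_contra hcon
        exact hII (Nat.le_sqrt.mp (by omega))
      rw [if_neg hle, Finset.Ico_eq_empty (by omega)]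
      simp

theorem pvCountB_eq (M : ℕ) (hM : 1 ≤ M) :
    pvCountB (M : Int)
      = ((∑ d ∈ Finset.Icc 1 (Nat.sqrt M),
          (if d ∣ M then (if d * d = M then 1 else 2) else 0) : ℕ) : Int) := by
  unfold pvCountB
  have ht : ((M : Int)).toNat = M := by omega
  rw [ht, show ((1 : Int)) = ((1 : ℕ) : Int) from rfl]
  rw [pvCountBGo_eq M (M + 1) 1 0 (by omega) (by have := Nat.sqrt_le_self M; omega)]
  have h2 : Finset.Ico 1 (Nat.sqrt M + 1) = Finset.Icc 1 (Nat.sqrt M) := by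
    ext x
    simp only [Finset.mem_Ico, Finset.mem_Icc]
    omega
  rw [h2]
  ring

-- the sqrt-pairing identity: every divisor d of M pairs with M / d
theorem pvPairing (M : ℕ) (hM : 1 ≤ M) :
    ((Finset.Icc 1 M).filter (· ∣ M)).card
      = ∑ d ∈ Finset.Icc 1 (Nat.sqrt M),
          (if d ∣ M then (if d * d = M then 1 else 2) else 0) := by
  have hM0 : M ≠ 0 := by omega
  set Div := (Finset.Icc 1 M).filter (· ∣ M) with hDiv
  set S := (Finset.Icc 1 (Nat.sqrt M)).filter (· ∣ M) with hS
  set L := Div.filter (fun d => M ≤ d * d) with hL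
  set T := S.filter (fun d => d * d = M) with hT
  -- S is exactly the divisors with d*d ≤ M
  have hmemS : ∀ d, d ∈ S ↔ (1 ≤ d ∧ d ∣ M ∧ d * d ≤ M) := by
    intro d
    simp only [hS, Finset.mem_filter, Finset.mem_Icc]
    constructor
    · rintro ⟨⟨h1, h2⟩, h3⟩
      exact ⟨h1, h3, Nat.le_sqrt.mp h2⟩
    · rintro ⟨h1, h2, h3⟩
      exact ⟨⟨h1, Nat.le_sqrt.mpr h3⟩, h2⟩
  have hmemL : ∀ d, d ∈ L ↔ (1 ≤ d ∧ d ∣ M ∧ M ≤ d * d) := by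
    intro d
    simp only [hL, hDiv, Finset.mem_filter, Finset.mem_Icc]
    constructor
    · rintro ⟨⟨⟨h1, _⟩, h2⟩, h3⟩
      exact ⟨h1, h2, h3⟩
    · rintro ⟨h1, h2, h3⟩
      exact ⟨⟨⟨h1, Nat.le_of_dvd (by omega) h2⟩, h2⟩, h3⟩
  -- the pairing d ↦ M / d is a bijection from L to S
  have hLS : L.card = S.card := by
    refine Finset.card_bij (fun d _ => M / d) ?_ ?_ ?_
    · intro d hd
      rw [hmemL] at hd
      obtain ⟨h1, h2, h3⟩ := hd
      have hdvd : M / d ∣ M := ⟨d, (Nat.div_mul_cancel h2).symm⟩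
      have hdle : M / d ≤ d := by
        have hlt : M < (d + 1) * d := by
          have he : (d + 1) * d = d * d + d := by ring
          omega
        have := (Nat.div_lt_iff_lt_mul (by omega : 0 < d)).mpr hlt
        omega
      rw [hmemS]
      refine ⟨Nat.div_pos (Nat.le_of_dvd (by omega) h2) (by omega), hdvd, ?_⟩
      calc M / d * (M / d) ≤ M / d * d := Nat.mul_le_mul le_rfl hdle
        _ = M := Nat.div_mul_cancel h2
    · intro d1 hd1 d2 hd2 he
      rw [hmemL] at hd1 hd2
      have he' : M / d1 = M / d2 := he
      have e1 : M / (M / d1) = d1 := Nat.div_div_self hd1.2.1 hM0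
      have e2 : M / (M / d2) = d2 := Nat.div_div_self hd2.2.1 hM0
      rw [← e1, ← e2, he']
    · intro b hb
      rw [hmemS] at hb
      obtain ⟨h1, h2, h3⟩ := hb
      have hdvd : M / b ∣ M := ⟨b, (Nat.div_mul_cancel h2).symm⟩
      have hble : b ≤ M / b := (Nat.le_div_iff_mul_le (by omega)).mpr h3
      refine ⟨M / b, ?_, Nat.div_div_self h2 hM0⟩
      rw [hmemL]
      refine ⟨Nat.div_pos (Nat.le_of_dvd (by omega) h2) (by omega), hdvd, ?_⟩
      calc M = b * (M / b) := (Nat.mul_div_cancel' h2).symm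
        _ ≤ M / b * (M / b) := Nat.mul_le_mul hble le_rfl
  -- Div together with the perfect-square divisor counts both halves
  have hUI : Div.card + T.card = S.card + L.card := by
    have hunion : S ∪ L = Div := by
      ext d
      simp only [Finset.mem_union, hmemS, hmemL, hDiv, Finset.mem_filter, Finset.mem_Icc]
      constructor
      · rintro (⟨h1, h2, _⟩ | ⟨h1, h2, _⟩) <;>
          exact ⟨⟨h1, Nat.le_of_dvd (by omega) h2⟩, h2⟩
      · rintro ⟨⟨h1, _⟩, h2⟩
        rcases Nat.le_total (d * d) M with hc | hc
        · exact Or.inl ⟨h1, h2, hc⟩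
        · exact Or.inr ⟨h1, h2, hc⟩
    have hinter : S ∩ L = T := by
      ext d
      simp only [Finset.mem_inter, hmemS, hmemL, hT, Finset.mem_filter]
      constructor
      · rintro ⟨⟨h1, h2, h3⟩, ⟨_, _, h6⟩⟩
        exact ⟨⟨h1, h2, h3⟩, by omega⟩
      · rintro ⟨⟨h1, h2, h3⟩, he⟩
        exact ⟨⟨h1, h2, h3⟩, h1, h2, by omega⟩
    rw [← hunion, ← hinter]
    exact Finset.card_union_add_card_inter S L
  -- the right-hand sum equals 2·|S| − |T|, additively
  have hsum : (∑ d ∈ Finset.Icc 1 (Nat.sqrt M),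
        (if d ∣ M then (if d * d = M then 1 else 2) else 0)) + T.card = 2 * S.card := by
    have h1 : (∑ d ∈ Finset.Icc 1 (Nat.sqrt M),
          (if d ∣ M then (if d * d = M then 1 else 2) else 0))
        = ∑ d ∈ S, (if d * d = M then 1 else 2) := by
      rw [hS, Finset.sum_filter]
    have h2 : T.card = ∑ d ∈ S, (if d * d = M then 1 else 0) := by
      rw [hT, Finset.card_filter]
    rw [h1, h2, ← Finset.sum_add_distrib]
    have h3 : ∀ d ∈ S, ((if d * d = M then 1 else 2) + (if d * d = M then 1 else 0)) = 2 := by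
      intro d _
      split_ifs <;> omega
    rw [Finset.sum_congr rfl h3, Finset.sum_const, smul_eq_mul]
    ring
  omega

theorem pvCount_eq {m : Int} (h : 1 ≤ m) :
    pvCountA m = pvCountB m := by
  obtain ⟨M, rfl⟩ : ∃ M : ℕ, m = (M : Int) := ⟨m.toNat, by omega⟩
  have hM : 1 ≤ M := by exact_mod_cast h
  rw [pvCountA_eq M hM, pvCountB_eq M hM, pvPairing M hM]

-- A's divisor count is never negative (the running-series invariant 1 ≤ last is preserved)
theorem pvCountA_nonneg (m : Int) : 0 ≤ pvCountA m := by
  unfold pvCountA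
  rw [PySem.List.foldl_if_add_one]
  omega

theorem pvLoop_eq (n : Int) :
    ∀ (fuel : ℕ) (last : Int), 1 ≤ last → ∀ (acc : List Int),
    pvLoopA n fuel last acc = pvLoopB n fuel last acc := by
  intro fuel
  induction fuel with
  | zero =>
    intro last _ acc
    rw [pvLoopA, pvLoopB]
  | succ fuel ih =>
    intro last h acc
    rw [pvLoopA, pvLoopB]
    by_cases hle : last ≤ n
    · rw [if_pos hle, if_pos hle, ← pvCount_eq h]
      exact ih (last + pvCountA last) (by have := pvCountA_nonneg last; omega) _
    · rw [if_neg hle, if_neg hle]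

-- ===== VERDICT (by name: the statement is the Claim_ definition above) =====
theorem serieJulianachi_spec : Claim_equal_serieJulianachi := by
  intro n _
  unfold Spec_serieJulianachi serieJulianachi serieJulianachi_alt
  exact pvLoop_eq n (n.toNat + 1) 1 (by omega) [1]
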